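-- pv_equiv track=rewrite | github.com/Brian2795/decrypt-vigenere | evalkey.py | split_streams
-- ===== SOURCE A (Python) =====
-- NUM_STREAMS = 7
--
-- def split_streams( msg, num_streams=NUM_STREAMS ):
-- 	""" splits the msg into distinct streams based on estimated key length """
-- 	streams = []
-- 	for i in range(num_streams):
-- 		pos = i
-- 		stream = []
-- 		while pos < len(msg):
-- 			stream.append(msg[pos])
-- 			pos += num_streams
-- 		streams.append(stream)
-- 	return streams
-- ===== SOURCE B (Python) =====
-- NUM_STREAMS = 7
--
-- def split_streams(msg, num_streams=NUM_STREAMS):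
--     """ splits the msg into distinct streams based on estimated key length """
--     if num_streams < 1:
--         return []
--     streams = [[] for _ in range(num_streams)]
--     for i, ch in enumerate(msg):
--         streams[i % num_streams].append(ch)
--     return streams
-- ===== Notes on version B (the rewrite author's own statement) =====
-- stated objective: alternative
-- what changed: Replaces A's per-stream strided walks over the message (one inner while-loop per stream) with a single round-robin pass that appends each character to stream i % num_streams.
import Mathlib
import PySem

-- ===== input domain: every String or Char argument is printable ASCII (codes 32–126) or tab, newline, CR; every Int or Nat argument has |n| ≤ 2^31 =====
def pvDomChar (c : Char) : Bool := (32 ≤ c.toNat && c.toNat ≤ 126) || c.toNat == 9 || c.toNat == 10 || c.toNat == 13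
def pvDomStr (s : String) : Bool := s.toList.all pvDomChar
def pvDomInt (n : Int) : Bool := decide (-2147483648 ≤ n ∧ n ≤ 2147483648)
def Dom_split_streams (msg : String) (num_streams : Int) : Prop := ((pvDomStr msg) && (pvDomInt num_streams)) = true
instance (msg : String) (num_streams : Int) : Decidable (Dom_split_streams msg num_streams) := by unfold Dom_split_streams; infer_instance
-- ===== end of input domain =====

-- B replaces A's per-stream strided walks with one round-robin pass over the message (alternative decomposition, same cost).

-- ===== PORT A =====
-- the inner 'while pos < len(msg)' loop; fuel = msg length bounds the iteration count
def pvWhileA (chars : List Char) (ns : Int) : Nat → Int → List String → List String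
  | 0, _, stream => stream
  | fuel + 1, pos, stream =>
    if pos < (chars.length : Int) then
      match PySem.List.pyGet? chars pos with
      | some c => pvWhileA chars ns fuel (pos + ns) (stream ++ [String.mk [c]])
      | none => stream   -- unreachable: 0 ≤ pos < len
    else stream

def split_streams (msg : String) (num_streams : Int) : List (List String) :=
  (PySem.List.pyRange 0 num_streams 1).foldl
    (fun streams i => streams ++ [pvWhileA msg.toList num_streams msg.toList.length i []]) []

-- ===== PORT B =====
def split_streams_alt (msg : String) (num_streams : Int) : List (List String) :=
  if num_streams < 1 then []
  else
    (PySem.List.enumerate msg.toList 0).foldl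
      (fun streams p =>
        streams.modify (PySem.Int.mod p.1 num_streams).toNat (fun s => s ++ [String.mk [p.2]]))
      (List.replicate num_streams.toNat [])

-- ===== PRECONDITION & SPEC =====
def Spec_split_streams (msg : String) (num_streams : Int) (out : List (List String)) : Prop := out = split_streams_alt msg num_streams
instance (msg : String) (num_streams : Int) (out : List (List String)) : Decidable (Spec_split_streams msg num_streams out) := by unfold Spec_split_streams; infer_instance

-- ===== CLAIM (what is proved, stated in full; the proofs are below) =====
def Claim_equal_split_streams : Prop := ∀ (msg : String) (num_streams : Int), Dom_split_streams msg num_streams → Spec_split_streams msg num_streams (split_streams msg num_streams)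

-- ===== LEMMAS AND PROOFS =====

theorem pv_filt_nil (len pos : Nat) (q : Nat → Bool) (h : len ≤ pos) :
    (List.range len).filter (fun p => pos ≤ p && q p) = [] := by
  rw [List.filter_eq_nil_iff]
  intro p hp
  simp only [List.mem_range] at hp
  simp only [Bool.and_eq_true, decide_eq_true_eq, not_and]
  intro hle
  omega

theorem pv_filt_step (len n pos : Nat) (hn : 1 ≤ n) (hpos : pos < len) :
    (List.range len).filter (fun p => pos ≤ p && (p % n == pos % n)) =
      pos :: (List.range len).filter (fun p => pos + n ≤ p && (p % n == (pos + n) % n)) := by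
  induction len with
  | zero => omega
  | succ len ih =>
    rw [List.range_succ, List.filter_append, List.filter_append]
    by_cases hlt : pos < len
    · rw [ih hlt]
      have hiff : (decide (pos ≤ len) && (len % n == pos % n))
          = (decide (pos + n ≤ len) && (len % n == (pos + n) % n)) := by
        rw [Nat.add_mod_right]
        by_cases hm : len % n = pos % n
        · have hdvd : n ∣ len - pos := (Nat.modEq_iff_dvd' (Nat.le_of_lt hlt)).mp hm.symm
          have hge := Nat.le_of_dvd (by omega) hdvd
          have h1 : pos ≤ len := by omega
          have h2 : pos + n ≤ len := by omega
          simp [hm, h1, h2]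
        · have hb : (len % n == pos % n) = false := by simpa using hm
          rw [hb, Bool.and_false, Bool.and_false]
      simp only [List.filter_cons, List.filter_nil, hiff, List.cons_append]
    · have hpe : pos = len := by omega
      subst hpe
      have h1 : (List.range pos).filter (fun p => pos ≤ p && (p % n == pos % n)) = [] :=
        pv_filt_nil pos pos _ (le_refl pos)
      have h2 : (List.range pos).filter (fun p => pos + n ≤ p && (p % n == (pos + n) % n)) = [] :=
        pv_filt_nil pos (pos + n) _ (by omega)
      rw [h1, h2]
      have hc1 : (decide (pos ≤ pos) && (pos % n == pos % n)) = true := by simp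
      have hc2 : (decide (pos + n ≤ pos) && (pos % n == (pos + n) % n)) = false := by
        have : ¬ (pos + n ≤ pos) := by omega
        simp [this]
      simp only [List.filter_cons, List.filter_nil, hc1, hc2]
      simp

-- A's inner while loop collects the positions ≥ pos congruent to pos mod n, in order
theorem pv_whileA_eq (chars : List Char) (n : Nat) (hn : 1 ≤ n) :
    ∀ (fuel pos : Nat) (acc : List String), chars.length ≤ pos + fuel →
    pvWhileA chars (n : Int) fuel (pos : Int) acc =
      acc ++ ((List.range chars.length).filter (fun p => pos ≤ p && (p % n == pos % n))).map
        (fun p => String.mk [chars.getD p 'a']) := by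
  intro fuel
  induction fuel with
  | zero =>
    intro pos acc h
    rw [pvWhileA, pv_filt_nil chars.length pos (fun p => p % n == pos % n) (by omega)]
    simp only [List.map_nil, List.append_nil]
  | succ fuel ih =>
    intro pos acc h
    rw [pvWhileA]
    by_cases hlt : pos < chars.length
    · have hcast : ((pos : Int) < (chars.length : Int)) := by exact_mod_cast hlt
      rw [if_pos hcast]
      have hget : PySem.List.pyGet? chars (pos : Int) = some chars[pos] := by
        rw [PySem.List.pyGet?_natCast]
        exact List.getElem?_eq_getElem hlt
      rw [hget]
      have hcast2 : ((pos : Int) + (n : Int)) = ((pos + n : Nat) : Int) := by push_cast; ring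
      dsimp only
      rw [hcast2, ih (pos + n) _ (by omega)]
      rw [pv_filt_step chars.length n pos hn hlt]
      rw [List.map_cons, List.getD_eq_getElem chars 'a' hlt]
      simp
    · have hcast : ¬ ((pos : Int) < (chars.length : Int)) := by exact_mod_cast hlt
      rw [if_neg hcast, pv_filt_nil chars.length pos (fun p => p % n == pos % n) (by omega)]
      simp

-- peeling one character off the round-robin target streams
theorem pv_filt_cons (n k j : Nat) (c : Char) (rest : List Char) :
    List.map (fun p => String.mk [(c :: rest).getD p 'a'])
        (List.filter (fun p => (k + p) % n == j) (List.range (c :: rest).length)) =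
      (if k % n = j then [String.mk [c]] else []) ++
        List.map (fun p => String.mk [rest.getD p 'a'])
          (List.filter (fun p => (k + 1 + p) % n == j) (List.range rest.length)) := by
  rw [show (c :: rest).length = rest.length + 1 from rfl]
  rw [List.range_succ_eq_map, List.filter_cons, List.filter_map]
  have hfil : List.filter ((fun p => (k + p) % n == j) ∘ Nat.succ) (List.range rest.length)
      = List.filter (fun p => (k + 1 + p) % n == j) (List.range rest.length) := by
    apply List.filter_congr
    intro p _
    simp only [Function.comp]
    have : k + Nat.succ p = k + 1 + p := by omega
    rw [this]
  by_cases hc : k % n = j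
  · have hc0 : ((k + 0) % n == j) = true := by simp [hc]
    rw [if_pos hc0, if_pos hc]
    rw [List.map_cons, List.map_map, hfil]
    have hfun : ((fun p => String.mk [(c :: rest).getD p 'a']) ∘ Nat.succ)
        = fun p => String.mk [rest.getD p 'a'] := by
      funext p
      simp [Function.comp]
    rw [hfun]
    simp
  · rw [if_neg hc]
    have hcond : ¬ (((k + 0) % n == j) = true) := by simp [hc]
    rw [if_neg hcond]
    rw [List.map_map, hfil]
    have hfun : ((fun p => String.mk [(c :: rest).getD p 'a']) ∘ Nat.succ)
        = fun p => String.mk [rest.getD p 'a'] := by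
      funext p
      simp [Function.comp]
    rw [hfun]
    simp

-- B's round-robin fold: stream j accumulates the characters at positions ≡ j (mod n)
theorem pv_foldB_eq (n : Nat) (_hn : 1 ≤ n) :
    ∀ (rest : List Char) (k : Nat) (streams : List (List String)),
    (PySem.List.enumerate rest (k : Int)).foldl
        (fun streams p =>
          streams.modify (PySem.Int.mod p.1 (n : Int)).toNat (fun s => s ++ [String.mk [p.2]]))
        streams =
      streams.mapIdx (fun j s =>
        s ++ ((List.range rest.length).filter (fun p => (k + p) % n == j)).map
          (fun p => String.mk [rest.getD p 'a'])) := by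
  intro rest
  induction rest with
  | nil =>
    intro k streams
    rw [PySem.List.enumerate_nil]
    simp only [List.foldl_nil]
    apply List.ext_getElem
    · simp
    · intro i h1 h2
      simp [List.getElem_mapIdx]
  | cons c rest ih =>
    intro k streams
    rw [PySem.List.enumerate_cons, List.foldl_cons]
    have hk1 : ((k : Int) + 1) = ((k + 1 : Nat) : Int) := by push_cast; ring
    have hmod : (PySem.Int.mod (k : Int) (n : Int)).toNat = k % n := by
      rw [PySem.Int.mod_natCast]; omega
    dsimp only
    rw [hk1, hmod, ih (k + 1)]
    apply List.ext_getElem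
    · simp
    · intro j h1 h2
      have hj : j < streams.length := by simpa using h2
      simp only [List.getElem_mapIdx]
      rw [List.getElem_modify _ _ _ _ (by simpa using hj)]
      rw [pv_filt_cons n k j c rest]
      by_cases hc : k % n = j
      · rw [if_pos hc, if_pos hc]
        simp [List.append_assoc]
      · rw [if_neg hc, if_neg hc]
        simp

theorem pv_mapIdx_replicate (n : Nat) (h : Nat → List String) :
    (List.replicate n ([] : List String)).mapIdx (fun j s => s ++ h j) =
      (List.range n).map h := by
  apply List.ext_getElem
  · simp
  · intro i h1 h2
    simp [List.getElem_mapIdx]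

-- ===== VERDICT (by name: the statement is the Claim_ definition above) =====
theorem split_streams_spec : Claim_equal_split_streams := by
  intro msg num_streams _
  unfold Spec_split_streams split_streams split_streams_alt
  by_cases hlt : num_streams < 1
  · rw [if_pos hlt, PySem.List.pyRange_one_eq_nil (by omega)]
    simp
  · rw [if_neg hlt]
    obtain ⟨n, hn⟩ : ∃ n : Nat, num_streams = (n : Int) :=
      ⟨num_streams.toNat, (Int.toNat_of_nonneg (by omega)).symm⟩
    have hn1 : 1 ≤ n := by omega
    subst hn
    rw [PySem.List.foldl_append_singleton_eq_map, List.nil_append]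
    rw [PySem.List.pyRange_one, List.map_map]
    have hA : ((fun i => pvWhileA msg.toList (n : Int) msg.toList.length i []) ∘ fun k : Nat => (0 : Int) + (k : Int))
        = fun j : Nat =>
            ((List.range msg.toList.length).filter (fun p => j ≤ p && (p % n == j % n))).map
              (fun p => String.mk [msg.toList.getD p 'a']) := by
      funext j
      simp only [Function.comp, zero_add]
      rw [pv_whileA_eq msg.toList n hn1 msg.toList.length j [] (by omega)]
      rw [List.nil_append]
    have hsub : (((n : Int) - 0).toNat) = n := by omega
    rw [hA, hsub]
    have h0 : (0 : Int) = ((0 : Nat) : Int) := rfl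
    rw [h0, pv_foldB_eq n hn1 msg.toList 0]
    have htn : ((n : Int)).toNat = n := by omega
    rw [htn, pv_mapIdx_replicate]
    apply List.map_congr_left
    intro j hj
    simp only [List.mem_range] at hj
    congr 1
    apply List.filter_congr
    intro p _
    have hjm : j % n = j := Nat.mod_eq_of_lt hj
    rw [hjm]
    by_cases hp : p % n = j
    · have hle : j ≤ p := by rw [← hp]; exact Nat.mod_le p n
      simp [hp, hle]
    · simp [hp]
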